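-- pv_equiv track=rewrite | github.com/xarvinxx/titanverifier | host/adb/client.py | _is_connection_error
-- ===== SOURCE A (Python) =====
-- def _is_connection_error(stderr: str) -> bool:
--     """
--     Erkennt ADB-Verbindungsfehler die einen Retry + Reconnect rechtfertigen.
--
--     v4.0: Erweitert um alle bekannten ADB-Disconnection-Patterns,
--     insbesondere "no devices/emulators found" (häufig nach Reboot).
--     """
--     indicators = [
--         "error: device not found",
--         "error: no devices",
--         "no devices/emulators found",
--         "error: device offline",
--         "error: closed",
--         "cannot connect to daemon",
--         "connection refused",
--         "adb: error: failed to get feature set",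
--         "protocol fault",
--         "error: device unauthorized",
--         "error: device still authorizing",
--         "more than one device",
--     ]
--     stderr_lower = stderr.lower()
--     return any(ind.lower() in stderr_lower for ind in indicators)
-- ===== SOURCE B (Python) =====
-- import re
--
-- # One compiled regex replacing the twelve substring scans; the six
-- # "error: ..." indicators are factored behind a shared prefix group.
-- _CONNECTION_ERROR_RE = re.compile(
--     "error: (?:device not found|no devices|device offline|closed"
--     "|device unauthorized|device still authorizing)"
--     "|no devices/emulators found"
--     "|cannot connect to daemon"
--     "|connection refused"
--     "|adb: error: failed to get feature set"
--     "|protocol fault"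
--     "|more than one device"
-- )
--
-- def _is_connection_error(stderr: str) -> bool:
--     return _CONNECTION_ERROR_RE.search(stderr.lower()) is not None
-- ===== Notes on version B (the rewrite author's own statement) =====
-- stated objective: idiomatic
-- what changed: Replaces the twelve independent substring-containment scans by a single compiled regular expression searched once over the lowered string, with the six indicators that share a common prefix factored behind one group.
import Mathlib
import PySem

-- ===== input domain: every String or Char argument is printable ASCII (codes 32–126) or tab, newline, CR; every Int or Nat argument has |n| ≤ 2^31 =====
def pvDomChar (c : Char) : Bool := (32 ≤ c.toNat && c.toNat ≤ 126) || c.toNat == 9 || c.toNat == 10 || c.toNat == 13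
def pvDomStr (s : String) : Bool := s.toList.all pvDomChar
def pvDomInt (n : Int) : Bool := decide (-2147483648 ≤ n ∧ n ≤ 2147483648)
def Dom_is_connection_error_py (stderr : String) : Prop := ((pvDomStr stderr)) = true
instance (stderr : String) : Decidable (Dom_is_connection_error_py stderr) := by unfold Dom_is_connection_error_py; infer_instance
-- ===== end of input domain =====

-- B replaces the twelve independent substring scans by a single regex-style search:
-- one position scan over the lowered string where the six "error: ..." indicators are
-- factored behind a shared prefix; objective: idiomatic (same result).


-- ===== PORT A =====
def is_connection_error_py (stderr : String) : Bool :=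
  let indicators : List String := [
    "error: device not found",
    "error: no devices",
    "no devices/emulators found",
    "error: device offline",
    "error: closed",
    "cannot connect to daemon",
    "connection refused",
    "adb: error: failed to get feature set",
    "protocol fault",
    "error: device unauthorized",
    "error: device still authorizing",
    "more than one device"]
  let stderr_lower := PySem.Str.lower stderr
  indicators.any (fun ind => PySem.Str.isIn (PySem.Str.lower ind) stderr_lower)

-- ===== PORT B =====
-- Hand port of the compiled regex (PySem has no regex): the pattern is a pure
-- alternation of literals, with the six "error: ..." branches grouped behind the
-- common prefix.  re.search tries a match at every start position 0..len(s);
-- 'search(...) is not None' is therefore 'some position matches'.  Exact.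
def pvErrorSuffixes : List String :=
  ["device not found", "no devices", "device offline", "closed",
   "device unauthorized", "device still authorizing"]

def pvOtherBranches : List String :=
  ["no devices/emulators found", "cannot connect to daemon", "connection refused",
   "adb: error: failed to get feature set", "protocol fault", "more than one device"]

-- a match of the pattern starting at the head of l
def pvMatchHere (l : List Char) : Bool :=
  (PySem.Chars.startswith l ("error: ".toList)
     && pvErrorSuffixes.any (fun t => PySem.Chars.startswith (l.drop 7) t.toList))
  || pvOtherBranches.any (fun t => PySem.Chars.startswith l t.toList)

def is_connection_error_py_alt (stderr : String) : Bool :=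
  let s := (PySem.Str.lower stderr).toList
  (List.range (s.length + 1)).any (fun i => pvMatchHere (s.drop i))

-- ===== PRECONDITION & SPEC =====
def Spec_is_connection_error_py (stderr : String) (out : Bool) : Prop := out = is_connection_error_py_alt stderr
instance (stderr : String) (out : Bool) : Decidable (Spec_is_connection_error_py stderr out) := by unfold Spec_is_connection_error_py; infer_instance

-- ===== CLAIM (what is proved, stated in full; the proofs are below) =====
def Claim_equal_is_connection_error_py : Prop := ∀ (stderr : String), Dom_is_connection_error_py stderr → Spec_is_connection_error_py stderr (is_connection_error_py stderr)

-- ===== LEMMAS AND PROOFS =====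

-- a prefix of a concatenation, split at the first part's length
theorem pv_prefix_append_iff (p q l : List Char) :
    (p ++ q) <+: l ↔ p <+: l ∧ q <+: l.drop p.length := by
  constructor
  · rintro ⟨t, ht⟩
    subst ht
    constructor
    · exact ⟨q ++ t, by simp⟩
    · exact ⟨t, by simp⟩
  · rintro ⟨⟨t1, ht1⟩, ⟨t2, ht2⟩⟩
    refine ⟨t2, ?_⟩
    subst ht1
    simpa using ht2

-- infix = some suffix position matches, positions up to length inclusive
theorem pv_infix_iff_scan (sub s : List Char) (h : sub ≠ []) :
    sub <:+: s ↔ ∃ i ∈ List.range (s.length + 1), sub <+: s.drop i := by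
  rw [← PySem.Chars.isIn_iff_infix, ← PySem.Chars.exists_prefix_drop_iff_isIn]
  constructor
  · rintro ⟨j, hj⟩
    refine ⟨j, List.mem_range.mpr ?_, hj⟩
    by_contra hlt
    push Not at hlt
    rw [List.drop_eq_nil_of_le (by omega)] at hj
    exact h (List.prefix_nil.mp hj)
  · rintro ⟨j, _, hj⟩; exact ⟨j, hj⟩

-- a match of the pattern at the head of l = some indicator is a prefix of l
theorem pv_matchHere_iff (l : List Char) :
    pvMatchHere l = true ↔
      ∃ ind ∈ ["error: device not found", "error: no devices",
        "no devices/emulators found", "error: device offline", "error: closed",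
        "cannot connect to daemon", "connection refused",
        "adb: error: failed to get feature set", "protocol fault",
        "error: device unauthorized", "error: device still authorizing",
        "more than one device"], ind.toList <+: l := by
  unfold pvMatchHere
  simp only [Bool.or_eq_true, Bool.and_eq_true, List.any_eq_true,
    PySem.Chars.startswith_iff, pvErrorSuffixes, pvOtherBranches,
    List.mem_cons, List.not_mem_nil, or_false]
  constructor
  · rintro (⟨hp, t, ht, hsuf⟩ | ⟨t, ht, hpre⟩)
    · rcases ht with rfl|rfl|rfl|rfl|rfl|rfl
      · exact ⟨"error: device not found", by simp, by
          rw [show ("error: device not found").toList = "error: ".toList ++ ("device not found").toList from by decide]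
          rw [pv_prefix_append_iff]
          exact ⟨hp, hsuf⟩⟩
      · exact ⟨"error: no devices", by simp, by
          rw [show ("error: no devices").toList = "error: ".toList ++ ("no devices").toList from by decide]
          rw [pv_prefix_append_iff]
          exact ⟨hp, hsuf⟩⟩
      · exact ⟨"error: device offline", by simp, by
          rw [show ("error: device offline").toList = "error: ".toList ++ ("device offline").toList from by decide]
          rw [pv_prefix_append_iff]
          exact ⟨hp, hsuf⟩⟩
      · exact ⟨"error: closed", by simp, by
          rw [show ("error: closed").toList = "error: ".toList ++ ("closed").toList from by decide]
          rw [pv_prefix_append_iff]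
          exact ⟨hp, hsuf⟩⟩
      · exact ⟨"error: device unauthorized", by simp, by
          rw [show ("error: device unauthorized").toList = "error: ".toList ++ ("device unauthorized").toList from by decide]
          rw [pv_prefix_append_iff]
          exact ⟨hp, hsuf⟩⟩
      · exact ⟨"error: device still authorizing", by simp, by
          rw [show ("error: device still authorizing").toList = "error: ".toList ++ ("device still authorizing").toList from by decide]
          rw [pv_prefix_append_iff]
          exact ⟨hp, hsuf⟩⟩
    · rcases ht with rfl|rfl|rfl|rfl|rfl|rfl
      · exact ⟨"no devices/emulators found", by simp, hpre⟩
      · exact ⟨"cannot connect to daemon", by simp, hpre⟩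
      · exact ⟨"connection refused", by simp, hpre⟩
      · exact ⟨"adb: error: failed to get feature set", by simp, hpre⟩
      · exact ⟨"protocol fault", by simp, hpre⟩
      · exact ⟨"more than one device", by simp, hpre⟩
  · rintro ⟨ind, hind, hpre⟩
    rcases hind with rfl|rfl|rfl|rfl|rfl|rfl|rfl|rfl|rfl|rfl|rfl|rfl
    · left
      rw [show ("error: device not found").toList = "error: ".toList ++ ("device not found").toList from by decide,
        pv_prefix_append_iff] at hpre
      exact ⟨hpre.1, ("device not found" : String), by simp, hpre.2⟩
    · left
      rw [show ("error: no devices").toList = "error: ".toList ++ ("no devices").toList from by decide,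
        pv_prefix_append_iff] at hpre
      exact ⟨hpre.1, ("no devices" : String), by simp, hpre.2⟩
    · right
      exact ⟨("no devices/emulators found" : String), by simp, hpre⟩
    · left
      rw [show ("error: device offline").toList = "error: ".toList ++ ("device offline").toList from by decide,
        pv_prefix_append_iff] at hpre
      exact ⟨hpre.1, ("device offline" : String), by simp, hpre.2⟩
    · left
      rw [show ("error: closed").toList = "error: ".toList ++ ("closed").toList from by decide,
        pv_prefix_append_iff] at hpre
      exact ⟨hpre.1, ("closed" : String), by simp, hpre.2⟩
    · right
      exact ⟨("cannot connect to daemon" : String), by simp, hpre⟩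
    · right
      exact ⟨("connection refused" : String), by simp, hpre⟩
    · right
      exact ⟨("adb: error: failed to get feature set" : String), by simp, hpre⟩
    · right
      exact ⟨("protocol fault" : String), by simp, hpre⟩
    · left
      rw [show ("error: device unauthorized").toList = "error: ".toList ++ ("device unauthorized").toList from by decide,
        pv_prefix_append_iff] at hpre
      exact ⟨hpre.1, ("device unauthorized" : String), by simp, hpre.2⟩
    · left
      rw [show ("error: device still authorizing").toList = "error: ".toList ++ ("device still authorizing").toList from by decide,
        pv_prefix_append_iff] at hpre
      exact ⟨hpre.1, ("device still authorizing" : String), by simp, hpre.2⟩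
    · right
      exact ⟨("more than one device" : String), by simp, hpre⟩

-- ===== VERDICT (by name: the statement is the Claim_ definition above) =====
theorem is_connection_error_py_spec : Claim_equal_is_connection_error_py := by
  intro stderr _
  unfold Spec_is_connection_error_py is_connection_error_py is_connection_error_py_alt
  simp only []
  rw [Bool.eq_iff_iff]
  rw [List.any_eq_true, List.any_eq_true]
  constructor
  · rintro ⟨ind, hind, hIn⟩
    have hlow : PySem.Str.lower ind = ind := by fin_cases hind <;> rfl
    rw [hlow, PySem.Str.isIn_iff_infix] at hIn
    have hne : ind.toList ≠ [] := by fin_cases hind <;> simp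
    rw [pv_infix_iff_scan _ _ hne] at hIn
    obtain ⟨i, hi, hpre⟩ := hIn
    exact ⟨i, hi, (pv_matchHere_iff _).mpr ⟨ind, by fin_cases hind <;> simp, hpre⟩⟩
  · rintro ⟨i, hi, hm⟩
    obtain ⟨ind, hind, hpre⟩ := (pv_matchHere_iff _).mp hm
    refine ⟨ind, by simpa using hind, ?_⟩
    have hlow : PySem.Str.lower ind = ind := by
      simp only [List.mem_cons, List.not_mem_nil, or_false] at hind
      rcases hind with rfl|rfl|rfl|rfl|rfl|rfl|rfl|rfl|rfl|rfl|rfl|rfl <;> rfl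
    have hne : ind.toList ≠ [] := by
      simp only [List.mem_cons, List.not_mem_nil, or_false] at hind
      rcases hind with rfl|rfl|rfl|rfl|rfl|rfl|rfl|rfl|rfl|rfl|rfl|rfl <;> simp
    rw [hlow, PySem.Str.isIn_iff_infix, pv_infix_iff_scan _ _ hne]
    exact ⟨i, hi, hpre⟩
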